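-- pv_equiv track=rewrite | github.com/MikaSukie/Orcat-Lang | ORCC.py | _visual_col
-- ===== SOURCE A (Python) =====
-- def _visual_col(line: str, col: int, tabsize: int = 4) -> int:
-- 	if col <= 1:
-- 		return 0
-- 	visual = 0
-- 	for ch in line[: col - 1]:
-- 		if ch == "\t":
-- 			visual += tabsize - (visual % tabsize)
-- 		else:
-- 			visual += 1
-- 	return visual
-- ===== SOURCE B (Python) =====
-- def _visual_col(line: str, col: int, tabsize: int = 4) -> int:
-- 	if col <= 1:
-- 		return 0
-- 	segments = line[: col - 1].split("\t")
-- 	visual = 0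
-- 	for segment in segments[:-1]:
-- 		visual += len(segment)
-- 		visual += tabsize - (visual % tabsize)
-- 	return visual + len(segments[-1])
-- ===== Notes on version B (the rewrite author's own statement) =====
-- stated objective: alternative
-- what changed: B splits the prefix line[:col-1] on '\t' and loops over the resulting chunks (adding each chunk's length at once and one tab-stop advance per separator) instead of A's per-character loop with a branch on every character.
import Mathlib
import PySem

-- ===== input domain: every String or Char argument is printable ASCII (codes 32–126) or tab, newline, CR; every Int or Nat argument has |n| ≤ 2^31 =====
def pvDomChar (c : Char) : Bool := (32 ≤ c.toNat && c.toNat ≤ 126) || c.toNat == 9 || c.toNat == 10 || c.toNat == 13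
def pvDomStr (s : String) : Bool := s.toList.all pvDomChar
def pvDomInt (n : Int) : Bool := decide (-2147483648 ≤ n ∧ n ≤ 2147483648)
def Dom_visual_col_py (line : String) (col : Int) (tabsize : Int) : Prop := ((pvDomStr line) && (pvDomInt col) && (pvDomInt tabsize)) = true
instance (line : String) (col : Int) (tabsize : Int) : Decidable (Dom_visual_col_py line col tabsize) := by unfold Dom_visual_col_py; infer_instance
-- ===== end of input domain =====

-- B replaces A's per-character loop by a loop over the chunks produced by split('\t'): same value, different decomposition (objective: alternative).

-- ===== PORT A =====
def visual_col_py (line : String) (col : Int) (tabsize : Int) : Int :=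
  if col ≤ 1 then 0
  else
    (PySem.Str.slice line none (some (col - 1))).toList.foldl
      (fun visual ch =>
        if ch = '\t' then visual + (tabsize - PySem.Int.mod visual tabsize)
        else visual + 1) 0

-- ===== PORT B =====
def visual_col_py_alt (line : String) (col : Int) (tabsize : Int) : Int :=
  if col ≤ 1 then 0
  else
    let segments := PySem.Chars.splitOn (PySem.Str.slice line none (some (col - 1))).toList ['\t']
    segments.dropLast.foldl
      (fun visual seg =>
        let visual := visual + (PySem.Chars.len seg : Int)
        visual + (tabsize - PySem.Int.mod visual tabsize)) 0
    + ((PySem.Chars.len ((PySem.List.pyGet? segments (-1)).getD [])) : Int)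

-- ===== PRECONDITION & SPEC =====
-- Pre_ excludes exactly the inputs where the Python raises ZeroDivisionError:
-- tabsize = 0 while col > 1 and a tab occurs in line[:col-1] (both A and B raise there).
def Pre_visual_col_py (line : String) (col : Int) (tabsize : Int) : Prop :=
  tabsize ≠ 0 ∨ col ≤ 1 ∨ PySem.Str.isIn "\t" (PySem.Str.slice line none (some (col - 1))) = false
instance (line : String) (col : Int) (tabsize : Int) : Decidable (Pre_visual_col_py line col tabsize) := by unfold Pre_visual_col_py; infer_instance
def pvWitness_visual_col_py : String × Int × Int := ("a\tb", 4, 4)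

def Spec_visual_col_py (line : String) (col : Int) (tabsize : Int) (out : Int) : Prop := out = visual_col_py_alt line col tabsize
instance (line : String) (col : Int) (tabsize : Int) (out : Int) : Decidable (Spec_visual_col_py line col tabsize out) := by unfold Spec_visual_col_py; infer_instance

-- ===== CLAIM (what is proved, stated in full; the proofs are below) =====
def Claim_equal_visual_col_py : Prop := ∀ (line : String) (col : Int) (tabsize : Int), Dom_visual_col_py line col tabsize → Pre_visual_col_py line col tabsize → Spec_visual_col_py line col tabsize (visual_col_py line col tabsize)

-- ===== LEMMAS AND PROOFS =====

-- structural model of split('\t') on a char list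
def pvSp : List Char → List (List Char)
  | [] => [[]]
  | c :: rest =>
    if c = '\t' then [] :: pvSp rest
    else
      match pvSp rest with
      | [] => [[c]]
      | s :: ss => (c :: s) :: ss

theorem pvSp_ne_nil (cs : List Char) : pvSp cs ≠ [] := by
  cases cs with
  | nil => simp [pvSp]
  | cons c rest =>
    simp only [pvSp]
    split_ifs
    · simp
    · cases h : pvSp rest <;> simp

theorem pv_go_spec : ∀ (l : List Char) (fuel : Nat) (cur : List Char) (acc : List (List Char)),
    l.length < fuel →
    PySem.Chars.splitOn.go ['\t'] fuel l cur acc =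
      acc.reverse ++ ((cur.reverse ++ (pvSp l).headD []) :: (pvSp l).tail) := by
  intro l
  induction l with
  | nil =>
    intro fuel cur acc h
    cases fuel with
    | zero => omega
    | succ f => simp [PySem.Chars.splitOn.go, pvSp]
  | cons c rest ih =>
    intro fuel cur acc h
    cases fuel with
    | zero => omega
    | succ f =>
      by_cases hc : c = '\t'
      · subst hc
        rw [PySem.Chars.splitOn.go]
        simp only [List.isPrefixOf, List.length]
        rw [if_pos (by simp)]
        simp only [List.drop_succ_cons, List.drop_zero, List.length_cons] at *
        rw [ih f [] (cur.reverse :: acc) (by omega)]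
        have := pvSp_ne_nil rest
        cases hs : pvSp rest with
        | nil => exact absurd hs this
        | cons s ss => simp [pvSp, hs]
      · rw [PySem.Chars.splitOn.go]
        rw [if_neg (by simp [List.isPrefixOf]; exact fun h => hc h.symm)]
        simp only [List.length_cons] at h
        rw [ih f (c :: cur) acc (by omega)]
        have := pvSp_ne_nil rest
        cases hs : pvSp rest with
        | nil => exact absurd hs this
        | cons s ss => simp [pvSp, hc, hs]

theorem pv_splitOn_eq_sp (cs : List Char) :
    PySem.Chars.splitOn cs ['\t'] = pvSp cs := by
  unfold PySem.Chars.splitOn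
  rw [pv_go_spec cs (cs.length + 1) [] [] (by omega)]
  have := pvSp_ne_nil cs
  cases hs : pvSp cs with
  | nil => exact absurd hs this
  | cons s ss => simp

-- B's combination of a nonempty segment list, abstractly
def pvStepB (ts : Int) (v : Int) (seg : List Char) : Int :=
  (v + (seg.length : Int)) + (ts - PySem.Int.mod (v + (seg.length : Int)) ts)

def pvComb (ts : Int) (segs : List (List Char)) (v : Int) : Int :=
  segs.dropLast.foldl (pvStepB ts) v + ((segs.getLastD []).length : Int)

theorem pvComb_cons_cons (ts : Int) (c : Char) (s : List Char) (ss : List (List Char)) (v : Int) :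
    pvComb ts ((c :: s) :: ss) v = pvComb ts (s :: ss) (v + 1) := by
  cases ss with
  | nil => simp [pvComb]; ring
  | cons t ts' =>
    simp only [pvComb, List.dropLast_cons_of_ne_nil (by simp : (t :: ts') ≠ []),
      List.foldl_cons, List.getLastD_cons]
    have : pvStepB ts v (c :: s) = pvStepB ts (v + 1) s := by
      simp [pvStepB]; ring_nf
    rw [this]

theorem pvComb_step (ts : Int) (a s : List Char) (ss : List (List Char)) (v : Int) :
    pvComb ts (a :: s :: ss) v = pvComb ts (s :: ss) (pvStepB ts v a) := by
  simp [pvComb, List.dropLast_cons_of_ne_nil (by simp : (s :: ss) ≠ [])]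

theorem pv_fold_eq (ts : Int) (cs : List Char) : ∀ (v : Int),
    cs.foldl (fun visual ch =>
        if ch = '\t' then visual + (ts - PySem.Int.mod visual ts) else visual + 1) v
      = pvComb ts (pvSp cs) v := by
  induction cs with
  | nil => intro v; simp [pvComb, pvSp]
  | cons c rest ih =>
    intro v
    have hne := pvSp_ne_nil rest
    cases hs : pvSp rest with
    | nil => exact absurd hs hne
    | cons s ss =>
      by_cases hc : c = '\t'
      · subst hc
        rw [show pvSp ('\t' :: rest) = [] :: s :: ss from by simp [pvSp, hs]]
        rw [pvComb_step]
        simp only [List.foldl_cons]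
        rw [ih]
        rw [show pvStepB ts v [] = v + (ts - PySem.Int.mod v ts) from by simp [pvStepB]]
        rw [hs]
        simp
      · rw [show pvSp (c :: rest) = (c :: s) :: ss from by simp [pvSp, hc, hs]]
        simp only [List.foldl_cons, if_neg hc]
        rw [ih, hs, pvComb_cons_cons]

theorem pv_last_eq (segs : List (List Char)) :
    ((PySem.List.pyGet? segs (-1)).getD []) = segs.getLastD [] := by
  rw [PySem.List.pyGet?_neg_one]
  simp [List.getLastD_eq_getLast?]

-- ===== VERDICT (by name: the statement is the Claim_ definition above) =====
theorem visual_col_py_spec : Claim_equal_visual_col_py := by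
  intro line col tabsize _ _
  unfold Spec_visual_col_py visual_col_py visual_col_py_alt
  by_cases hcol : col ≤ 1
  · simp [hcol]
  · rw [if_neg hcol, if_neg hcol]
    rw [pv_splitOn_eq_sp, pv_fold_eq]
    have hne := pvSp_ne_nil (PySem.List.slice line.toList none (some (col - 1)))
    simp [pvComb, PySem.Chars.len, pv_last_eq _, List.getLastD_eq_getLast?]
    rfl
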